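-- pv_equiv track=rewrite | github.com/michael-ross-ven/vengeance | vengeance/vengeance/util/dates.py | __compatible_with_strptime_lengths
-- ===== SOURCE A (Python) =====
-- def __compatible_with_strptime_lengths(s, common_formats):
--     _common_formats_ = [df.replace('%Y', '2000')
--                           .replace('%m', '01')
--                           .replace('%d', '01')
--                           .replace('%b', 'jan') for df in common_formats]
--
--     max_cf = max(len(cf) for cf in _common_formats_)
--     min_cf = min(len(cf) for cf in _common_formats_) - 2
--     len_s = len(s)
--
--     return min_cf <= len_s <= max_cf
-- ===== SOURCE B (Python) =====
-- def _effective_len(df):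
--     # length of df after strptime-placeholder substitution, computed in one scan:
--     # %Y -> 4 chars, %m/%d -> 2 chars, %b -> 3 chars, anything else -> 1 char each
--     n = 0
--     i = 0
--     L = len(df)
--     while i < L:
--         if df.startswith('%Y', i):
--             n += 4; i += 2
--         elif df.startswith('%m', i) or df.startswith('%d', i):
--             n += 2; i += 2
--         elif df.startswith('%b', i):
--             n += 3; i += 2
--         else:
--             n += 1; i += 1
--     return n
--
--
-- def __compatible_with_strptime_lengths(s, common_formats):
--     lens = [_effective_len(df) for df in common_formats]
--     max_cf = max(lens)
--     min_cf = min(lens) - 2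
--     return min_cf <= len(s) <= max_cf
-- ===== Notes on version B (the rewrite author's own statement) =====
-- stated objective: simpler
-- what changed: Instead of materializing each format via four chained str.replace passes and measuring the results, B computes each format's substituted length directly in a single left-to-right scan (%Y->4, %m/%d->2, %b->3, other chars->1), never building the transformed strings.
import Mathlib
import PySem

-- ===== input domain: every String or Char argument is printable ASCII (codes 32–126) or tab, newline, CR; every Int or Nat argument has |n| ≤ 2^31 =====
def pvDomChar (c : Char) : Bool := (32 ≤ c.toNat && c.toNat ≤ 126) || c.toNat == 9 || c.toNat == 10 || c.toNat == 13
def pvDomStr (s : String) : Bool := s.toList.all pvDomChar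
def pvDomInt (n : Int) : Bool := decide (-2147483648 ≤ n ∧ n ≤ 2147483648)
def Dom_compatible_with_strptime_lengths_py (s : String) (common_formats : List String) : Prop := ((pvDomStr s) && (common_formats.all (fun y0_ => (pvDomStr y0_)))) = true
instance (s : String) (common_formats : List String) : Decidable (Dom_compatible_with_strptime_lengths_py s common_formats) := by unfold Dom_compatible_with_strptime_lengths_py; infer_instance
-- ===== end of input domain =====

-- B replaces the four chained str.replace materializations by a single arithmetic scan of each
-- format computing the substituted length directly (objective: simpler; return value only).

-- ===== PORT A =====
-- df.replace('%Y','2000').replace('%m','01').replace('%d','01').replace('%b','jan')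
def pvTransform (df : String) : String :=
  PySem.Str.replace (PySem.Str.replace (PySem.Str.replace (PySem.Str.replace df "%Y" "2000") "%m" "01") "%d" "01") "%b" "jan"

def compatible_with_strptime_lengths_py (s : String) (common_formats : List String) : Bool :=
  let cfs := common_formats.map pvTransform
  let lens := cfs.map PySem.Str.len
  match PySem.List.max? lens (fun x => x), PySem.List.min? lens (fun x => x) with
  | some max_cf, some mn =>
      let min_cf := mn - 2
      let len_s := PySem.Str.len s
      decide (min_cf ≤ len_s) && decide (len_s ≤ max_cf)
  | _, _ => false   -- unreachable: max()/min() raise ValueError on an empty sequence (excluded by Pre_)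

-- ===== PORT B =====
-- _effective_len's while loop: consume '%Y' (+4), '%m'/'%d' (+2), '%b' (+3), any other char (+1)
def pvScan : List Char → Nat
  | [] => 0
  | [_] => 1
  | c1 :: c2 :: t =>
    if c1 = '%' ∧ c2 = 'Y' then 4 + pvScan t
    else if c1 = '%' ∧ (c2 = 'm' ∨ c2 = 'd') then 2 + pvScan t
    else if c1 = '%' ∧ c2 = 'b' then 3 + pvScan t
    else 1 + pvScan (c2 :: t)

def pvEffectiveLen (df : String) : Int := (pvScan df.toList : Int)

def compatible_with_strptime_lengths_py_alt (s : String) (common_formats : List String) : Bool :=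
  let lens := common_formats.map pvEffectiveLen
  match PySem.List.max? lens (fun x => x) with
  | none => false   -- unreachable: max() raises ValueError on an empty sequence (excluded by Pre_)
  | some max_cf =>
    match PySem.List.min? lens (fun x => x) with
    | none => false
    | some mn =>
        let min_cf := mn - 2
        decide (min_cf ≤ PySem.Str.len s) && decide (PySem.Str.len s ≤ max_cf)

-- ===== PRECONDITION & SPEC =====
-- Pre_ excludes only the empty format list, on which max() raises ValueError in both A and B.
def Pre_compatible_with_strptime_lengths_py (s : String) (common_formats : List String) : Prop := common_formats ≠ []
instance (s : String) (common_formats : List String) : Decidable (Pre_compatible_with_strptime_lengths_py s common_formats) := by unfold Pre_compatible_with_strptime_lengths_py; infer_instance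

def pvWitness_compatible_with_strptime_lengths_py : String × List String := ("2000-01-01", ["%Y-%m-%d"])

def Spec_compatible_with_strptime_lengths_py (s : String) (common_formats : List String) (out : Bool) : Prop := out = compatible_with_strptime_lengths_py_alt s common_formats
instance (s : String) (common_formats : List String) (out : Bool) : Decidable (Spec_compatible_with_strptime_lengths_py s common_formats out) := by unfold Spec_compatible_with_strptime_lengths_py; infer_instance

-- ===== CLAIM (what is proved, stated in full; the proofs are below) =====
def Claim_equal_compatible_with_strptime_lengths_py : Prop := ∀ (s : String) (common_formats : List String), Dom_compatible_with_strptime_lengths_py s common_formats → Pre_compatible_with_strptime_lengths_py s common_formats → Spec_compatible_with_strptime_lengths_py s common_formats (compatible_with_strptime_lengths_py s common_formats)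

-- ===== LEMMAS AND PROOFS =====

-- clean structural form of PySem.Chars.replace (nonempty pattern o :: os)
def pvRep (o : Char) (os : List Char) (new : List Char) : List Char → List Char
  | [] => []
  | c :: t =>
    if (o :: os).isPrefixOf (c :: t) then new ++ pvRep o os new (List.drop os.length t)
    else c :: pvRep o os new t
termination_by l => l.length
decreasing_by all_goals (simp [List.length_drop]; try omega)

theorem pvRep_go (o : Char) (os new : List Char) :
    ∀ fuel l acc, l.length ≤ fuel →
      PySem.Chars.replace.go (o :: os) new fuel l acc = acc.reverse ++ pvRep o os new l := by
  intro fuel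
  induction fuel with
  | zero =>
    intro l acc h
    have hl : l = [] := List.eq_nil_of_length_eq_zero (Nat.le_zero.mp h)
    subst hl
    rw [PySem.Chars.replace.go] <;> simp [pvRep]
  | succ n ih =>
    intro l acc h
    match l with
    | [] =>
      rw [pvRep]
      have : PySem.Chars.replace.go (o :: os) new (n+1) [] acc = acc.reverse := by
        rw [PySem.Chars.replace.go]
        omega
      rw [this]
      simp
    | c :: t =>
      rw [PySem.Chars.replace.go, pvRep]
      by_cases hp : (o :: os).isPrefixOf (c :: t)
      · have hlen : (List.drop os.length t).length ≤ n := by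
          simp only [List.length_drop]
          simp only [List.length_cons] at h
          omega
        simp only [hp, if_true, List.length_cons, List.drop_succ_cons]
        rw [ih _ _ hlen]
        simp
      · have hlen : t.length ≤ n := by
          simp only [List.length_cons] at h
          omega
        simp only [hp, if_false]
        rw [ih _ _ hlen]
        simp

theorem replace_eq_pvRep (l : List Char) (o : Char) (os new : List Char) :
    PySem.Chars.replace l (o :: os) new = pvRep o os new l := by
  rw [PySem.Chars.replace]
  simp only [List.isEmpty_cons]
  exact pvRep_go o os new l.length l [] (Nat.le_refl _)

-- step lemmas for 2-char patterns '%' y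
theorem pvRep_nil (y : Char) (new : List Char) : pvRep '%' [y] new [] = [] := by rw [pvRep]

theorem isPrefixOf_two (y c : Char) (t : List Char) :
    (('%' : Char) :: [y]).isPrefixOf (c :: t) = (c = '%' ∧ t.head? = some y : Bool) := by
  cases t with
  | nil => simp [List.isPrefixOf]
  | cons c2 t2 =>
    apply Bool.eq_iff_iff.mpr
    simp [List.isPrefixOf]
    constructor
    · rintro ⟨a, b⟩; exact ⟨a.symm, b.symm⟩
    · rintro ⟨a, b⟩; exact ⟨a.symm, b.symm⟩

theorem pvRep_match (y : Char) (new t : List Char) :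
    pvRep '%' [y] new ('%' :: y :: t) = new ++ pvRep '%' [y] new t := by
  rw [pvRep, isPrefixOf_two]
  simp

theorem pvRep_nomatch (y c : Char) (new t : List Char) (hc : c ≠ '%') :
    pvRep '%' [y] new (c :: t) = c :: pvRep '%' [y] new t := by
  rw [pvRep, isPrefixOf_two]
  simp [hc]

theorem pvRep_pct_nomatch (y : Char) (new t : List Char) (ht : t.head? ≠ some y) :
    pvRep '%' [y] new ('%' :: t) = '%' :: pvRep '%' [y] new t := by
  rw [pvRep, isPrefixOf_two]
  simp [ht]

theorem pvRep_skip (y : Char) (new : List Char) (a : List Char) (ha : '%' ∉ a) (x : List Char) :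
    pvRep '%' [y] new (a ++ x) = a ++ pvRep '%' [y] new x := by
  induction a with
  | nil => simp
  | cons c a' ih =>
    have hc : c ≠ '%' := fun h => ha (h ▸ List.mem_cons_self)
    have ha' : '%' ∉ a' := fun h => ha (List.mem_cons_of_mem _ h)
    simp only [List.cons_append, pvRep_nomatch y c new _ hc, ih ha']

theorem pvRep_head (y : Char) (new : List Char) (hn : new ≠ []) (l : List Char) :
    (pvRep '%' [y] new l).head? = l.head? ∨ (pvRep '%' [y] new l).head? = new.head? := by
  match l with
  | [] => left; rw [pvRep_nil]
  | c :: t =>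
    rw [pvRep]
    by_cases hp : (('%' : Char) :: [y]).isPrefixOf (c :: t)
    · right; simp [hp, List.head?_append_of_ne_nil, hn]
      match new, hn with
      | n :: ns, _ => simp
    · left; simp [hp]

-- head is none of 'm','d','b'
def pvNotMDB (l : List Char) : Prop := l.head? ≠ some 'm' ∧ l.head? ≠ some 'd' ∧ l.head? ≠ some 'b'

theorem pvNotMDB_rep (y : Char) (new : List Char) (hn : new ≠ [])
    (hh : new.head? ≠ some 'm' ∧ new.head? ≠ some 'd' ∧ new.head? ≠ some 'b')
    (l : List Char) (hl : pvNotMDB l) : pvNotMDB (pvRep '%' [y] new l) := by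
  rcases pvRep_head y new hn l with h | h <;> unfold pvNotMDB <;> rw [h]
  · exact hl
  · exact hh

-- the four passes
def pvR1 (l : List Char) : List Char := pvRep '%' ['Y'] ['2','0','0','0'] l
def pvR2 (l : List Char) : List Char := pvRep '%' ['m'] ['0','1'] l
def pvR3 (l : List Char) : List Char := pvRep '%' ['d'] ['0','1'] l
def pvR4 (l : List Char) : List Char := pvRep '%' ['b'] ['j','a','n'] l
def pvChain (l : List Char) : List Char := pvR4 (pvR3 (pvR2 (pvR1 l)))

theorem pvR1_head (t : List Char) :
    (pvR1 ('%' :: t)).head? = some '%' ∨ (pvR1 ('%' :: t)).head? = some '2' := by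
  rcases pvRep_head 'Y' ['2','0','0','0'] (by simp) ('%' :: t) with h | h
  · left; simpa using h
  · right; simpa using h

theorem pvScan_cons_ne (c : Char) (t : List Char) (hc : c ≠ '%') :
    pvScan (c :: t) = 1 + pvScan t := by
  cases t with
  | nil => simp [pvScan]
  | cons c3 t' => simp [pvScan, hc]

theorem pvRep_single (y c : Char) (new : List Char) : pvRep '%' [y] new [c] = [c] := by
  by_cases hc : c = '%'
  · subst hc; rw [pvRep_pct_nomatch _ _ _ (by simp), pvRep_nil]
  · rw [pvRep_nomatch _ _ _ _ hc, pvRep_nil]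

theorem pvChain_len (l : List Char) : (pvChain l).length = pvScan l := by
  match l with
  | [] => simp [pvChain, pvR1, pvR2, pvR3, pvR4, pvRep_nil, pvScan]
  | [c] => simp [pvChain, pvR1, pvR2, pvR3, pvR4, pvRep_single, pvScan]
  | c1 :: c2 :: t =>
    by_cases h1 : c1 = '%'
    · subst h1
      by_cases hY : c2 = 'Y'
      · subst hY
        have e : pvChain ('%' :: 'Y' :: t) = ['2','0','0','0'] ++ pvChain t := by
          unfold pvChain pvR1 pvR2 pvR3 pvR4
          rw [pvRep_match 'Y' ['2','0','0','0'] t,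
              pvRep_skip 'm' ['0','1'] ['2','0','0','0'] (by decide) (pvRep '%' ['Y'] ['2','0','0','0'] t),
              pvRep_skip 'd' ['0','1'] ['2','0','0','0'] (by decide) (pvRep '%' ['m'] ['0','1'] (pvRep '%' ['Y'] ['2','0','0','0'] t)),
              pvRep_skip 'b' ['j','a','n'] ['2','0','0','0'] (by decide) (pvRep '%' ['d'] ['0','1'] (pvRep '%' ['m'] ['0','1'] (pvRep '%' ['Y'] ['2','0','0','0'] t)))]
        rw [e]
        have := pvChain_len t
        simp [pvScan, this]
        omega
      · by_cases hm : c2 = 'm'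
        · subst hm
          have e : pvChain ('%' :: 'm' :: t) = ['0','1'] ++ pvChain t := by
            unfold pvChain pvR1 pvR2 pvR3 pvR4
            rw [pvRep_pct_nomatch 'Y' ['2','0','0','0'] ('m' :: t) (by simp),
                pvRep_nomatch 'Y' 'm' ['2','0','0','0'] t (by decide),
                pvRep_match 'm' ['0','1'] (pvRep '%' ['Y'] ['2','0','0','0'] t),
                pvRep_skip 'd' ['0','1'] ['0','1'] (by decide) (pvRep '%' ['m'] ['0','1'] (pvRep '%' ['Y'] ['2','0','0','0'] t)),
                pvRep_skip 'b' ['j','a','n'] ['0','1'] (by decide) (pvRep '%' ['d'] ['0','1'] (pvRep '%' ['m'] ['0','1'] (pvRep '%' ['Y'] ['2','0','0','0'] t)))]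
          rw [e]
          have := pvChain_len t
          simp [pvScan, this]
          omega
        · by_cases hd : c2 = 'd'
          · subst hd
            have e : pvChain ('%' :: 'd' :: t) = ['0','1'] ++ pvChain t := by
              unfold pvChain pvR1 pvR2 pvR3 pvR4
              rw [pvRep_pct_nomatch 'Y' ['2','0','0','0'] ('d' :: t) (by simp),
                  pvRep_nomatch 'Y' 'd' ['2','0','0','0'] t (by decide),
                  pvRep_pct_nomatch 'm' ['0','1'] ('d' :: (pvRep '%' ['Y'] ['2','0','0','0'] t)) (by simp),
                  pvRep_nomatch 'm' 'd' ['0','1'] (pvRep '%' ['Y'] ['2','0','0','0'] t) (by decide),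
                  pvRep_match 'd' ['0','1'] (pvRep '%' ['m'] ['0','1'] (pvRep '%' ['Y'] ['2','0','0','0'] t)),
                  pvRep_skip 'b' ['j','a','n'] ['0','1'] (by decide) (pvRep '%' ['d'] ['0','1'] (pvRep '%' ['m'] ['0','1'] (pvRep '%' ['Y'] ['2','0','0','0'] t)))]
            rw [e]
            have := pvChain_len t
            simp [pvScan, this]
            omega
          · by_cases hb : c2 = 'b'
            · subst hb
              have e : pvChain ('%' :: 'b' :: t) = ['j','a','n'] ++ pvChain t := by
                unfold pvChain pvR1 pvR2 pvR3 pvR4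
                rw [pvRep_pct_nomatch 'Y' ['2','0','0','0'] ('b' :: t) (by simp),
                    pvRep_nomatch 'Y' 'b' ['2','0','0','0'] t (by decide),
                    pvRep_pct_nomatch 'm' ['0','1'] ('b' :: (pvRep '%' ['Y'] ['2','0','0','0'] t)) (by simp),
                    pvRep_nomatch 'm' 'b' ['0','1'] (pvRep '%' ['Y'] ['2','0','0','0'] t) (by decide),
                    pvRep_pct_nomatch 'd' ['0','1'] ('b' :: (pvRep '%' ['m'] ['0','1'] (pvRep '%' ['Y'] ['2','0','0','0'] t))) (by simp),
                    pvRep_nomatch 'd' 'b' ['0','1'] (pvRep '%' ['m'] ['0','1'] (pvRep '%' ['Y'] ['2','0','0','0'] t)) (by decide),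
                    pvRep_match 'b' ['j','a','n'] (pvRep '%' ['d'] ['0','1'] (pvRep '%' ['m'] ['0','1'] (pvRep '%' ['Y'] ['2','0','0','0'] t)))]
              rw [e]
              have := pvChain_len t
              simp [pvScan, this]
              omega
            · by_cases hp : c2 = '%'
              · -- '%%…': every pass steps over the first '%'
                subst hp
                have hAmdb : pvNotMDB (pvR1 ('%' :: t)) := by
                  rcases pvR1_head t with h | h <;>
                    exact ⟨by rw [h]; simp, by rw [h]; simp, by rw [h]; simp⟩
                have hBmdb : pvNotMDB (pvR2 (pvR1 ('%' :: t))) :=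
                  pvNotMDB_rep 'm' ['0','1'] (by simp) (by refine ⟨?_, ?_, ?_⟩ <;> simp) _ hAmdb
                have hCmdb : pvNotMDB (pvR3 (pvR2 (pvR1 ('%' :: t)))) :=
                  pvNotMDB_rep 'd' ['0','1'] (by simp) (by refine ⟨?_, ?_, ?_⟩ <;> simp) _ hBmdb
                have e : pvChain ('%' :: '%' :: t) = '%' :: pvChain ('%' :: t) := by
                  unfold pvChain pvR1 pvR2 pvR3 pvR4
                  rw [pvRep_pct_nomatch 'Y' ['2','0','0','0'] ('%' :: t) (by simp),
                      pvRep_pct_nomatch 'm' ['0','1'] (pvRep '%' ['Y'] ['2','0','0','0'] ('%' :: t))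
                        (by simpa [pvR1] using hAmdb.1),
                      pvRep_pct_nomatch 'd' ['0','1'] (pvRep '%' ['m'] ['0','1'] (pvRep '%' ['Y'] ['2','0','0','0'] ('%' :: t)))
                        (by simpa [pvR1, pvR2] using hBmdb.2.1),
                      pvRep_pct_nomatch 'b' ['j','a','n'] (pvRep '%' ['d'] ['0','1'] (pvRep '%' ['m'] ['0','1'] (pvRep '%' ['Y'] ['2','0','0','0'] ('%' :: t))))
                        (by simpa [pvR1, pvR2, pvR3] using hCmdb.2.2)]
                rw [e]
                have := pvChain_len ('%' :: t)
                simp [pvScan, this]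
                omega
              · -- '%c…' with c not a handled directive: both chars pass through every pass
                have e : pvChain ('%' :: c2 :: t) = '%' :: c2 :: pvChain t := by
                  unfold pvChain pvR1 pvR2 pvR3 pvR4
                  rw [pvRep_pct_nomatch 'Y' ['2','0','0','0'] (c2 :: t) (by simpa using hY),
                      pvRep_nomatch 'Y' c2 ['2','0','0','0'] t hp,
                      pvRep_pct_nomatch 'm' ['0','1'] (c2 :: (pvRep '%' ['Y'] ['2','0','0','0'] t)) (by simpa using hm),
                      pvRep_nomatch 'm' c2 ['0','1'] (pvRep '%' ['Y'] ['2','0','0','0'] t) hp,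
                      pvRep_pct_nomatch 'd' ['0','1'] (c2 :: (pvRep '%' ['m'] ['0','1'] (pvRep '%' ['Y'] ['2','0','0','0'] t))) (by simpa using hd),
                      pvRep_nomatch 'd' c2 ['0','1'] (pvRep '%' ['m'] ['0','1'] (pvRep '%' ['Y'] ['2','0','0','0'] t)) hp,
                      pvRep_pct_nomatch 'b' ['j','a','n'] (c2 :: (pvRep '%' ['d'] ['0','1'] (pvRep '%' ['m'] ['0','1'] (pvRep '%' ['Y'] ['2','0','0','0'] t)))) (by simpa using hb),
                      pvRep_nomatch 'b' c2 ['j','a','n'] (pvRep '%' ['d'] ['0','1'] (pvRep '%' ['m'] ['0','1'] (pvRep '%' ['Y'] ['2','0','0','0'] t))) hp]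
                rw [e]
                have := pvChain_len t
                simp [pvScan, hY, hm, hd, hb, this, pvScan_cons_ne c2 t hp]
                omega
    · -- first char is not '%': it passes through every pass
      have e : pvChain (c1 :: c2 :: t) = c1 :: pvChain (c2 :: t) := by
        unfold pvChain pvR1 pvR2 pvR3 pvR4
        rw [pvRep_nomatch 'Y' c1 ['2','0','0','0'] (c2 :: t) h1,
            pvRep_nomatch 'm' c1 ['0','1'] (pvRep '%' ['Y'] ['2','0','0','0'] (c2 :: t)) h1,
            pvRep_nomatch 'd' c1 ['0','1'] (pvRep '%' ['m'] ['0','1'] (pvRep '%' ['Y'] ['2','0','0','0'] (c2 :: t))) h1,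
            pvRep_nomatch 'b' c1 ['j','a','n'] (pvRep '%' ['d'] ['0','1'] (pvRep '%' ['m'] ['0','1'] (pvRep '%' ['Y'] ['2','0','0','0'] (c2 :: t)))) h1]
      rw [e]
      have := pvChain_len (c2 :: t)
      simp [pvScan, h1, this]
      omega
termination_by l.length

theorem pvLen_transform (df : String) : PySem.Str.len (pvTransform df) = pvEffectiveLen df := by
  rw [PySem.Str.len_eq, pvEffectiveLen]
  have h : (pvTransform df).toList = pvChain df.toList := by
    simp only [pvTransform, PySem.Str.toList_replace]
    have eY : ("%Y" : String).toList = ['%', 'Y'] := rfl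
    have em : ("%m" : String).toList = ['%', 'm'] := rfl
    have ed : ("%d" : String).toList = ['%', 'd'] := rfl
    have eb : ("%b" : String).toList = ['%', 'b'] := rfl
    have e4 : ("2000" : String).toList = ['2', '0', '0', '0'] := rfl
    have e01 : ("01" : String).toList = ['0', '1'] := rfl
    have ejan : ("jan" : String).toList = ['j', 'a', 'n'] := rfl
    rw [eY, em, ed, eb, e4, e01, ejan,
        replace_eq_pvRep, replace_eq_pvRep, replace_eq_pvRep, replace_eq_pvRep]
    rfl
  rw [h, pvChain_len]

-- ===== VERDICT (by name: the statement is the Claim_ definition above) =====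
theorem compatible_with_strptime_lengths_py_spec : Claim_equal_compatible_with_strptime_lengths_py := by
  intro s common_formats _ _
  unfold Spec_compatible_with_strptime_lengths_py
  unfold compatible_with_strptime_lengths_py compatible_with_strptime_lengths_py_alt
  have h : (common_formats.map pvTransform).map PySem.Str.len = common_formats.map pvEffectiveLen := by
    rw [List.map_map]
    exact List.map_congr_left (fun df _ => pvLen_transform df)
  simp only [h]
  rcases PySem.List.max? (common_formats.map pvEffectiveLen) (fun x => x) with _ | mx <;>
    rcases PySem.List.min? (common_formats.map pvEffectiveLen) (fun x => x) with _ | mn <;> rfl
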